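-- pv_equiv track=rewrite | github.com/DansiDanutz/SemeStudio | src/seo/metadata.py | _enforce_tag_limits
-- ===== SOURCE A (Python) =====
-- MAX_TAGS_LENGTH = 500  # Total character limit for all tags
--
-- MAX_TAG_COUNT = 15
--
-- def _enforce_tag_limits(tags: list[str]) -> list[str]:
--     """Trim tags to fit YouTube's limits."""
--     result = []
--     total_length = 0
--
--     for tag in tags:
--         tag = tag.strip()
--         if not tag:
--             continue
--
--         # +1 for comma separator
--         tag_cost = len(tag) + 1
--         if total_length + tag_cost > MAX_TAGS_LENGTH:
--             break
--         if len(result) >= MAX_TAG_COUNT: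
--             break
--
--         result.append(tag)
--         total_length += tag_cost
--
--     return result
-- ===== SOURCE B (Python) =====
-- MAX_TAGS_LENGTH = 500  # Total character limit for all tags
--
-- MAX_TAG_COUNT = 15
--
-- def _enforce_tag_limits(tags: list[str]) -> list[str]:
--     """Trim tags to fit YouTube's limits (clean-then-cutoff, two passes)."""
--     cleaned = [s for t in tags if (s := t.strip())]
--     totals = []
--     acc = 0
--     for s in cleaned:
--         acc += len(s) + 1
--         totals.append(acc)
--     # totals is strictly increasing, so this count is the longest prefix length
--     n = sum(1 for t in totals if t <= MAX_TAGS_LENGTH)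
--     return cleaned[:min(n, MAX_TAG_COUNT)]
-- ===== Notes on version B (the rewrite author's own statement) =====
-- stated objective: alternative
-- what changed: Replaces the single fused strip/limit/break loop by a two-pass decomposition: first build the cleaned tag list, then compute running comma-costs and take the prefix cleaned[:min(n, 15)] where n counts running totals <= 500.
import Mathlib
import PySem

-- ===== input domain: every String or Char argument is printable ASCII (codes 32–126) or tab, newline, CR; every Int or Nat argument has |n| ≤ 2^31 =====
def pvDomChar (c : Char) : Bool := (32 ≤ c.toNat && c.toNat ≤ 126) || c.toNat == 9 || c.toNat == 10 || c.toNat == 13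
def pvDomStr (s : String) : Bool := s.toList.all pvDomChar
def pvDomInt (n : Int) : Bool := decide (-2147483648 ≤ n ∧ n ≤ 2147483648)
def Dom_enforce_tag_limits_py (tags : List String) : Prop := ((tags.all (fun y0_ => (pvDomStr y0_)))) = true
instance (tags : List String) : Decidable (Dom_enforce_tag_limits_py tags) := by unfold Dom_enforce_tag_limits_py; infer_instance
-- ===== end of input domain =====

-- B replaces A's fused strip/limit/break loop by a clean-then-cutoff two-pass decomposition (objective: alternative, same cost).

-- ===== PORT A =====
-- the fused loop of A: state = (result, total_length)
def pvALoop (tags : List String) (result : List String) (total : Int) : List String :=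
  match tags with
  | [] => result
  | t :: rest =>
    let tag := PySem.Str.strip t
    if tag = "" then pvALoop rest result total
    else
      let tag_cost : Int := PySem.Str.len tag + 1
      if total + tag_cost > 500 then result
      else if (result.length : Int) ≥ 15 then result
      else pvALoop rest (result ++ [tag]) (total + tag_cost)

def enforce_tag_limits_py (tags : List String) : List String :=
  pvALoop tags [] 0

-- ===== PORT B =====
def enforce_tag_limits_py_alt (tags : List String) : List String :=
  let cleaned := (tags.map PySem.Str.strip).filter (fun s => s ≠ "")
  let totals := (cleaned.foldl (fun (p : List Int × Int) s =>
      let acc := p.2 + (PySem.Str.len s + 1)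
      (p.1 ++ [acc], acc)) ([], 0)).1
  let n := (totals.filter (fun t => t ≤ 500)).length
  cleaned.take (min n 15)

-- ===== PRECONDITION & SPEC =====
def Spec_enforce_tag_limits_py (tags : List String) (out : List String) : Prop := out = enforce_tag_limits_py_alt tags
instance (tags : List String) (out : List String) : Decidable (Spec_enforce_tag_limits_py tags out) := by unfold Spec_enforce_tag_limits_py; infer_instance

-- ===== CLAIM (what is proved, stated in full; the proofs are below) =====
def Claim_equal_enforce_tag_limits_py : Prop := ∀ (tags : List String), Dom_enforce_tag_limits_py tags → Spec_enforce_tag_limits_py tags (enforce_tag_limits_py tags)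

-- ===== LEMMAS AND PROOFS =====

-- running totals of comma-costs starting from `tot`
def pvTotals (l : List String) (tot : Int) : List Int :=
  match l with
  | [] => []
  | s :: rest => (tot + (PySem.Str.len s + 1)) :: pvTotals rest (tot + (PySem.Str.len s + 1))

theorem pvTotals_lt (l : List String) (tot : Int) : ∀ x ∈ pvTotals l tot, tot < x := by
  induction l generalizing tot with
  | nil => intro x hx; simp [pvTotals] at hx
  | cons s rest ih =>
    intro x hx
    simp only [pvTotals, List.mem_cons] at hx
    have hlen : 0 ≤ PySem.Str.len s := by
      simp [PySem.Str.len]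
    rcases hx with h | h
    · omega
    · have := ih (tot + (PySem.Str.len s + 1)) x h
      omega

-- B's foldl computes pvTotals
theorem pvFoldl_totals (l : List String) (ts : List Int) (acc : Int) :
    (l.foldl (fun (p : List Int × Int) s =>
      (p.1 ++ [p.2 + (PySem.Str.len s + 1)], p.2 + (PySem.Str.len s + 1))) (ts, acc)).1
      = ts ++ pvTotals l acc := by
  induction l generalizing ts acc with
  | nil => simp [pvTotals]
  | cons s rest ih =>
    simp only [List.foldl_cons]
    rw [ih]
    simp [pvTotals]

-- the count of totals ≤ 500, as the cutoff
def pvCount (l : List String) (tot : Int) : Nat :=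
  ((pvTotals l tot).filter (fun t => t ≤ 500)).length

theorem pvCount_cons_le (s : String) (rest : List String) (tot : Int)
    (h : tot + (PySem.Str.len s + 1) ≤ 500) :
    pvCount (s :: rest) tot = pvCount rest (tot + (PySem.Str.len s + 1)) + 1 := by
  simp only [pvCount, pvTotals, List.filter_cons]
  rw [if_pos (by simpa [PySem.Str.len] using h)]
  simp

theorem pvCount_cons_gt (s : String) (rest : List String) (tot : Int)
    (h : ¬ tot + (PySem.Str.len s + 1) ≤ 500) :
    pvCount (s :: rest) tot = 0 := by
  have hempty : (pvTotals (s :: rest) tot).filter (fun t => t ≤ 500) = [] := by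
    rw [List.filter_eq_nil_iff]
    intro x hx
    have hge : tot + (PySem.Str.len s + 1) ≤ x := by
      simp only [pvTotals, List.mem_cons] at hx
      rcases hx with h' | h'
      · omega
      · have := pvTotals_lt rest (tot + (PySem.Str.len s + 1)) x h'
        omega
    simp only [decide_eq_true_eq]
    omega
  simp [pvCount, hempty]

-- the fused loop on the cleaned list
def pvBLoop (l : List String) (result : List String) (total : Int) : List String :=
  match l with
  | [] => result
  | s :: rest =>
    let cost : Int := PySem.Str.len s + 1
    if total + cost > 500 then result
    else if (result.length : Int) ≥ 15 then result
    else pvBLoop rest (result ++ [s]) (total + cost)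

theorem pvFilter_cons_ne (t : String) (rest : List String) (h : ¬ PySem.Str.strip t = "") :
    ((t :: rest).map PySem.Str.strip).filter (fun s => s ≠ "") =
      PySem.Str.strip t :: ((rest.map PySem.Str.strip).filter (fun s => s ≠ "")) := by
  simp [h]

-- A's loop = the fused loop over the cleaned list
theorem pvALoop_eq_pvBLoop (tags : List String) (r : List String) (tot : Int) :
    pvALoop tags r tot = pvBLoop ((tags.map PySem.Str.strip).filter (fun s => s ≠ "")) r tot := by
  induction tags generalizing r tot with
  | nil => simp [pvALoop, pvBLoop]
  | cons t rest ih =>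
    by_cases h : PySem.Str.strip t = ""
    · simp [pvALoop, List.map_cons, h, ih]
    · rw [pvFilter_cons_ne t rest h]
      simp only [pvALoop, pvBLoop, if_neg h]
      split_ifs with h1 h2
      · rfl
      · rfl
      · exact ih _ _

-- the fused loop = prefix-take with the counted cutoff
theorem pvBLoop_eq_take (l : List String) (r : List String) (tot : Int) :
    pvBLoop l r tot = r ++ l.take (min (pvCount l tot) (15 - r.length)) := by
  induction l generalizing r tot with
  | nil => simp [pvBLoop, pvCount, pvTotals]
  | cons s rest ih =>
    simp only [pvBLoop]
    split_ifs with h1 h2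
    · rw [pvCount_cons_gt s rest tot (by omega)]
      simp
    · have hc : (15 : Nat) - r.length = 0 := by omega
      simp [hc]
    · rw [pvCount_cons_le s rest tot (by omega), ih]
      have hr : r.length < 15 := by omega
      have hmin : min (pvCount rest (tot + (PySem.Str.len s + 1)) + 1) (15 - r.length)
          = min (pvCount rest (tot + (PySem.Str.len s + 1))) (15 - (r.length + 1)) + 1 := by
        omega
      rw [hmin]
      simp [List.take_succ_cons]

-- ===== VERDICT (by name: the statement is the Claim_ definition above) =====
theorem enforce_tag_limits_py_spec : Claim_equal_enforce_tag_limits_py := by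
  intro tags _
  unfold Spec_enforce_tag_limits_py enforce_tag_limits_py
  simp only [enforce_tag_limits_py_alt]
  rw [pvALoop_eq_pvBLoop, pvBLoop_eq_take, pvFoldl_totals]
  simp only [List.nil_append, List.length_nil, Nat.sub_zero, pvCount]
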